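-- pv_equiv track=rewrite | github.com/AM-ops/SecurityProject | Algorithms/algorithms.py | extendKeyLength
-- ===== SOURCE A (Python) =====
-- def extendKeyLength(messageLength,key):
--     keyLength = len(key)
--     newKey = list(key)
--     if messageLength == keyLength:
--         return(key)
--
--     else:
--         for i in range(0,(messageLength - keyLength)):
--             newKey.append(key[i % keyLength])
--         return ("".join(newKey)).upper()
-- ===== SOURCE B (Python) =====
-- def extendKeyLength(messageLength, key):
--     keyLength = len(key)
--     if messageLength == keyLength:
--         return key
--     extra = messageLength - keyLength
--     if extra <= 0:
--         return key.upper()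
--     reps = extra // keyLength + 1
--     return (key + (key * reps)[:extra]).upper()
-- ===== Notes on version B (the rewrite author's own statement) =====
-- stated objective: alternative
-- what changed: replaces the per-character cycling append loop with a closed form: integer division gives the repetition count, string repetition plus a slice build the tail in one step
import Mathlib
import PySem

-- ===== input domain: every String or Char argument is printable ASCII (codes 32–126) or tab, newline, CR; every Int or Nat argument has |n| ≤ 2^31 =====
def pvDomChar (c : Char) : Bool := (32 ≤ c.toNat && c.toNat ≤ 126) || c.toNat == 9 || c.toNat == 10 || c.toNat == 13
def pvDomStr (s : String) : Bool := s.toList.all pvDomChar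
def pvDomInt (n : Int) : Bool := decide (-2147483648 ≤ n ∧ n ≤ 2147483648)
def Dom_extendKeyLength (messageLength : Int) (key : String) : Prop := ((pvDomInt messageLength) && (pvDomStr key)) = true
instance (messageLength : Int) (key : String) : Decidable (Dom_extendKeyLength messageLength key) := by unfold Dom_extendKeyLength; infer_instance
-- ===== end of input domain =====

-- ===== PORT A =====
-- B changes the algorithm: the per-character cycling loop becomes key-repetition + slice (alternative decomposition).
-- A raises ZeroDivisionError when key is empty and messageLength > 0; Pre_ excludes exactly that (B raises there too).
def extendKeyLength (messageLength : Int) (key : String) : String :=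
  let keyLength : Int := PySem.Str.len key
  let newKey : List Char := key.toList
  if messageLength = keyLength then key
  else
    -- for i in range(0, messageLength - keyLength): newKey.append(key[i % keyLength])
    -- key[i % keyLength] ported as pyGetD: under Pre_ the index i % keyLength is always in range
    let newKey := (PySem.List.pyRange 0 (messageLength - keyLength) 1).foldl
      (fun acc i => acc ++ [PySem.List.pyGetD key.toList (PySem.Int.mod i keyLength) ' ']) newKey
    String.ofList (PySem.Chars.upper newKey)

-- ===== PORT B =====
-- key * reps  (reps ≥ 1 in the branch where it is used)
def pvStrMul (cs : List Char) : Nat → List Char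
  | 0 => []
  | n + 1 => cs ++ pvStrMul cs n

def extendKeyLength_alt (messageLength : Int) (key : String) : String :=
  let keyLength : Int := PySem.Str.len key
  if messageLength = keyLength then key
  else
    let extra := messageLength - keyLength
    if extra ≤ 0 then String.ofList (PySem.Chars.upper key.toList)
    else
      let reps := PySem.Int.floordiv extra keyLength + 1
      let tail := PySem.List.slice (pvStrMul key.toList reps.toNat) none (some extra)
      String.ofList (PySem.Chars.upper (key.toList ++ tail))

-- ===== PRECONDITION & SPEC =====
-- Pre_ excludes exactly the inputs where A raises ZeroDivisionError (i % 0): empty key with messageLength > 0.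
def Pre_extendKeyLength (messageLength : Int) (key : String) : Prop :=
  ¬ (PySem.Str.len key = 0 ∧ 0 < messageLength)
instance (messageLength : Int) (key : String) : Decidable (Pre_extendKeyLength messageLength key) := by unfold Pre_extendKeyLength; infer_instance
def pvWitness_extendKeyLength : Int × String := (7, "ab")

def Spec_extendKeyLength (messageLength : Int) (key : String) (out : String) : Prop := out = extendKeyLength_alt messageLength key
instance (messageLength : Int) (key : String) (out : String) : Decidable (Spec_extendKeyLength messageLength key out) := by unfold Spec_extendKeyLength; infer_instance

-- ===== CLAIM (what is proved, stated in full; the proofs are below) =====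
def Claim_equal_extendKeyLength : Prop := ∀ (messageLength : Int) (key : String), Dom_extendKeyLength messageLength key → Pre_extendKeyLength messageLength key → Spec_extendKeyLength messageLength key (extendKeyLength messageLength key)

-- ===== LEMMAS AND PROOFS =====

theorem pvStrMul_length (cs : List Char) (r : Nat) : (pvStrMul cs r).length = r * cs.length := by
  induction r with
  | zero => simp [pvStrMul]
  | succ n ih => simp [pvStrMul, ih]; ring

-- indexing into a repeated list is indexing modulo the block length
theorem pvStrMul_getElem (cs : List Char) (r j : Nat) (h : j < r * cs.length)
    (hj : j % cs.length < cs.length) :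
    (pvStrMul cs r)[j]'(by rw [pvStrMul_length]; exact h) = cs[j % cs.length] := by
  induction r generalizing j with
  | zero => omega
  | succ n ih =>
    simp only [pvStrMul]
    by_cases hlt : j < cs.length
    · rw [List.getElem_append_left hlt]
      congr 1
      exact (Nat.mod_eq_of_lt hlt).symm
    · have hle : cs.length ≤ j := Nat.le_of_not_lt hlt
      have hs : (n + 1) * cs.length = n * cs.length + cs.length := by ring
      have h2 : j - cs.length < n * cs.length := by omega
      have hmod : (j - cs.length) % cs.length = j % cs.length := by
        conv_rhs => rw [← Nat.sub_add_cancel hle]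
        rw [Nat.add_mod_right]
      rw [List.getElem_append_right hle, ih (j - cs.length) h2 (by omega)]
      simp only [hmod]

-- ===== VERDICT =====
theorem extendKeyLength_spec : Claim_equal_extendKeyLength := by
  unfold Claim_equal_extendKeyLength
  intro m key _ hpre
  unfold Pre_extendKeyLength at hpre
  unfold Spec_extendKeyLength extendKeyLength extendKeyLength_alt
  simp only [PySem.Str.len_eq]
  set l := key.toList with hl
  set k : Int := (l.length : Int) with hk
  by_cases heq : m = k
  · simp [heq]
  · simp only [heq, if_false]
    set n : Int := m - k with hn
    by_cases hnp : n ≤ 0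
    · -- empty loop: both return upper(key)
      rw [PySem.List.pyRange_one_eq_nil (by omega)]
      simp [hnp]
    · -- main case: 0 < n; Pre_ gives l ≠ []
      simp only [hnp, if_false]
      have hn0 : 0 < n := by omega
      have hklen : 0 < l.length := by
        rcases Nat.eq_zero_or_pos l.length with h0 | hpos
        · exfalso
          apply hpre
          refine ⟨?_, by omega⟩
          rw [PySem.Str.len_eq, ← hl, h0]
          rfl
        · exact hpos
      have hkpos : 0 < k := by omega
      rw [PySem.List.foldl_append_singleton_eq_map]
      set r : Nat := (PySem.Int.floordiv n k + 1).toNat with hr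
      have hdiv := PySem.Int.floordiv_mul_add_mod n k
      have hmodlt := PySem.Int.mod_lt n hkpos
      have hmodnn := PySem.Int.mod_nonneg n hkpos
      have hdivnn : 0 ≤ PySem.Int.floordiv n k := by nlinarith
      have hrk : (r : Int) = PySem.Int.floordiv n k + 1 := Int.toNat_of_nonneg (by omega)
      have hnle : n ≤ (r : Int) * k := by rw [hrk]; nlinarith
      have hslice : PySem.List.slice (pvStrMul l r) none (some n) = (pvStrMul l r).take n.toNat :=
        PySem.List.slice_to _ (by omega)
      rw [hslice]
      congr 2
      rw [List.append_right_inj]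
      have hcast : ((r * l.length : Nat) : Int) = (r : Int) * k := by rw [hk]; push_cast; ring
      apply List.ext_getElem
      · simp only [PySem.List.length_pyRange_one, List.length_map, List.length_take,
          pvStrMul_length, Int.sub_zero]
        omega
      · intro j h1 h2
        simp only [PySem.List.length_pyRange_one, List.length_map, Int.sub_zero] at h1
        have hjr : j < r * l.length := by omega
        rw [List.getElem_map, List.getElem_take, pvStrMul_getElem l r j hjr (Nat.mod_lt _ hklen)]
        rw [PySem.List.getElem_pyRange_one]
        simp only [Int.zero_add]
        have hm : PySem.Int.mod (j : Int) k = ((j % l.length : Nat) : Int) := by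
          rw [hk]; exact PySem.Int.mod_natCast j l.length
        rw [hm, PySem.List.pyGetD_natCast]
        exact List.getD_eq_getElem l ' ' _
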